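-- pv_equiv track=rewrite | github.com/SymmetricChaos/MyOtherMathStuff | Shuffling/AscendingSequences.py | ascending_sequences
-- ===== SOURCE A (Python) =====
-- def ascending_sequences(L):
--     L = L.copy()
--     S = []
--
--     while len(L) > 0:
--         # Start with an empty list and the first element of the current list
--         T = []
--         s = [L.pop(0)]
--         # Pop each element of the list, if it's the next in a sequence it goes
--         # into the s list, otherwise the T list
--         while len(L) > 0:
--             a = L.pop(0)
--             if a == s[-1]+1:
--                 s.append(a)
--             else:
--                 T.append(a)
--         # Add the sequence that was found to the list of sequences
--         S.append(s)
--         # The remainder is renamed to L to reuse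
--         L = T
--
--     return S
-- ===== SOURCE B (Python) =====
-- def ascending_sequences(L):
--     # Single streaming pass over L: keep all chains open and extend the
--     # earliest-created chain whose next expected value matches, instead of
--     # repeatedly sweeping the remainder (no pop(0), one traversal).
--     chains = []
--     for a in L:
--         for c in chains:
--             if c[-1] + 1 == a:
--                 c.append(a)
--                 break
--         else:
--             chains.append([a])
--     return chains
-- ===== Notes on version B (the rewrite author's own statement) =====
-- stated objective: faster
-- what changed: Instead of repeatedly sweeping the remaining list (building one chain per sweep with O(n) pop(0) calls), B makes a single streaming pass keeping every chain open and extends the earliest chain whose expected next value matches, creating a new chain otherwise.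
import Mathlib
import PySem

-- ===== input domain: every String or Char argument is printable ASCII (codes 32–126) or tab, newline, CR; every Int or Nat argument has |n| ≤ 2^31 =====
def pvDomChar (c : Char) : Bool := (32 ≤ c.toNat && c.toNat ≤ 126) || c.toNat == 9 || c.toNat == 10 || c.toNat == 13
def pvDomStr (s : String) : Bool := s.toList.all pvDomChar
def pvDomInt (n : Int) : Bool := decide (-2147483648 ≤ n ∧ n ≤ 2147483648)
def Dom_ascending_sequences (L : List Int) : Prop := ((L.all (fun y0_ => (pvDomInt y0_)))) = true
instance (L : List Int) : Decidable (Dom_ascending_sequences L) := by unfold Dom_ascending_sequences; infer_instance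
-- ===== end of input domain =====

-- B replaces A's repeated sweeps of the remainder (one chain per sweep, front-pops)
-- by one streaming pass that keeps all chains open; measurably faster (constant factor).

-- ===== PORT A =====
-- inner while-loop of A: pops each a from L; a extends s if a == s[-1]+1, else is appended to T.
-- Returns (final s, final T).  (s is nonempty at every call site, so s[-1] = getLast?.getD 0 is exact.)
def ascPass (s : List Int) (T : List Int) (L : List Int) : List Int × List Int :=
  match L with
  | [] => (s, T)
  | a :: rest =>
      if a = s.getLast?.getD 0 + 1 then ascPass (s ++ [a]) T rest
      else ascPass s (T ++ [a]) rest

theorem ascPass_snd_len (L : List Int) : ∀ s T, (ascPass s T L).2.length ≤ T.length + L.length := by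
  induction L with
  | nil => simp [ascPass]
  | cons a rest ih =>
      intro s T
      simp only [ascPass]
      split
      · refine le_trans (ih _ _) ?_
        simp only [List.length_cons]; omega
      · refine le_trans (ih _ _) ?_
        simp only [List.length_append, List.length_cons, List.length_nil]; omega

-- outer while-loop of A: pops the head to start s, runs a sweep, appends s to S, recurses on T.
def ascending_sequences (L : List Int) : List (List Int) :=
  match L with
  | [] => []
  | x :: rest =>
      let p := ascPass [x] [] rest
      p.1 :: ascending_sequences p.2
termination_by L.length
decreasing_by
  have h2 := ascPass_snd_len rest [x] []
  simp only [List.length_nil, List.length_cons, Nat.zero_add] at h2 ⊢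
  omega

-- ===== PORT B =====
-- for-loop over chains with break/else: extend the first chain c with c[-1]+1 == a;
-- none = no chain matched (the for-else branch fires).
def bExtendFirst (a : Int) (chains : List (List Int)) : Option (List (List Int)) :=
  match chains with
  | [] => none
  | c :: cs =>
      if c.getLast?.getD 0 + 1 = a then some ((c ++ [a]) :: cs)
      else (bExtendFirst a cs).map (fun cs' => c :: cs')

def bStep (chains : List (List Int)) (a : Int) : List (List Int) :=
  match bExtendFirst a chains with
  | some cs' => cs'
  | none => chains ++ [[a]]

def ascending_sequences_alt (L : List Int) : List (List Int) :=
  L.foldl bStep []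

-- ===== PRECONDITION & SPEC =====
def Spec_ascending_sequences (L : List Int) (out : List (List Int)) : Prop := out = ascending_sequences_alt L
instance (L : List Int) (out : List (List Int)) : Decidable (Spec_ascending_sequences L out) := by unfold Spec_ascending_sequences; infer_instance

-- ===== CLAIM (what is proved, stated in full; the proofs are below) =====
def Claim_equal_ascending_sequences : Prop := ∀ (L : List Int), Dom_ascending_sequences L → Spec_ascending_sequences L (ascending_sequences L)

-- ===== LEMMAS AND PROOFS =====

-- the T parameter of ascPass is a pure accumulator
theorem ascPass_acc (L : List Int) : ∀ s T,
    ascPass s T L = ((ascPass s [] L).1, T ++ (ascPass s [] L).2) := by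
  induction L with
  | nil => simp [ascPass]
  | cons a rest ih =>
      intro s T
      simp only [ascPass]
      split
      · exact ih _ _
      · simp only [List.nil_append]
        rw [ih s (T ++ [a]), ih s [a]]; simp

-- a step on (s :: cs): s captures a iff a = s[-1]+1, otherwise the step acts on cs alone
theorem bStep_cons (s : List Int) (cs : List (List Int)) (a : Int) :
    bStep (s :: cs) a =
      if a = s.getLast?.getD 0 + 1 then (s ++ [a]) :: cs else s :: bStep cs a := by
  simp only [bStep, bExtendFirst]
  by_cases h : s.getLast?.getD 0 + 1 = a
  · simp [h]
  · have h' : ¬ a = s.getLast?.getD 0 + 1 := fun he => h he.symm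
    simp only [if_neg h, if_neg h']
    cases hb : bExtendFirst a cs <;> simp

-- MAIN DECOMPOSITION: running B's fold with a front chain s equals one sweep of A
-- extracting s's elements, followed by B's fold on the cs-side over the leftovers.
theorem fold_cons_eq_pass (M : List Int) : ∀ (s : List Int) (cs : List (List Int)),
    M.foldl bStep (s :: cs) = (ascPass s [] M).1 :: (ascPass s [] M).2.foldl bStep cs := by
  induction M with
  | nil => intro s cs; simp [ascPass]
  | cons a rest ih =>
      intro s cs
      simp only [List.foldl_cons, bStep_cons, ascPass]
      by_cases h : a = s.getLast?.getD 0 + 1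
      · simp only [if_pos h]
        exact ih (s ++ [a]) cs
      · simp only [if_neg h, List.nil_append]
        rw [ih s (bStep cs a), ascPass_acc rest s [a]]
        simp

theorem asc_eq_fold (n : Nat) : ∀ (L : List Int), L.length ≤ n →
    ascending_sequences L = L.foldl bStep [] := by
  induction n with
  | zero =>
      intro L h
      have : L = [] := List.eq_nil_of_length_eq_zero (Nat.le_zero.mp h)
      subst this; rw [ascending_sequences]; rfl
  | succ n ih =>
      intro L h
      match L with
      | [] => rw [ascending_sequences]; rfl
      | x :: rest =>
          rw [ascending_sequences]
          simp only [List.foldl_cons]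
          have hstep : bStep [] x = [[x]] := by simp [bStep, bExtendFirst]
          rw [hstep, fold_cons_eq_pass rest [x] []]
          have hlen : (ascPass [x] [] rest).2.length ≤ n := by
            have := ascPass_snd_len rest [x] []
            simp at this h; omega
          rw [ih _ hlen]

-- ===== VERDICT (by name: the statement is the Claim_ definition above) =====
theorem ascending_sequences_spec : Claim_equal_ascending_sequences := by
  intro L _
  unfold Spec_ascending_sequences ascending_sequences_alt
  exact asc_eq_fold L.length L (le_refl _)
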